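-- pv_equiv track=rewrite | github.com/FennexFox/packetflow_foundry | builders/packet-workflow/retained-skills/gh-fix-pr-writeup/scripts/pr_writeup_tools.py | classify_changed_files
-- ===== SOURCE A (Python) =====
-- from typing import Iterable
--
-- def classify_changed_files(paths: Iterable[str]) -> dict[str, list[str]]:
--     groups: dict[str, list[str]] = {
--         "runtime": [],
--         "automation": [],
--         "docs": [],
--         "tests": [],
--         "config": [],
--         "other": [],
--     }
--     for path in paths:
--         normalized = path.replace("\\", "/")
--         lower = normalized.lower()
--         if (
--             "/tests/" in lower
--             or lower.endswith("_test.py")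
--             or lower.endswith(".tests.cs")
--             or lower.startswith(".github/scripts/tests/")
--         ):
--             groups["tests"].append(normalized)
--             continue
--         if (
--             lower.startswith(".github/workflows/")
--             or lower.startswith(".github/scripts/")
--             or lower.startswith(".github/issue_template/")
--         ):
--             groups["automation"].append(normalized)
--         elif lower.endswith(".md"):
--             groups["docs"].append(normalized)
--         elif (
--             lower.endswith(".yml")
--             or lower.endswith(".yaml")
--             or lower.endswith(".toml")
--             or lower.endswith(".json")
--             or lower.endswith(".csproj")
--             or lower.endswith(".props")
--             or lower.endswith(".targets")
--         ):
--             groups["config"].append(normalized)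
--         elif lower.endswith(".cs") or lower.endswith(".dll"):
--             groups["runtime"].append(normalized)
--         else:
--             groups["other"].append(normalized)
--     return groups
-- ===== SOURCE B (Python) =====
-- # B: ordered (bucket, predicate) rule table scanned per path + per-key comprehension,
-- # instead of A's if/elif cascade mutating a dict of lists (objective: idiomatic).
--
-- _RULES = [
--     ("tests", lambda l: "/tests/" in l
--         or l.endswith("_test.py") or l.endswith(".tests.cs")
--         or l.startswith(".github/scripts/tests/")),
--     ("automation", lambda l: l.startswith(".github/workflows/")
--         or l.startswith(".github/scripts/")
--         or l.startswith(".github/issue_template/")),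
--     ("docs", lambda l: l.endswith(".md")),
--     ("config", lambda l: l.endswith((".yml", ".yaml", ".toml", ".json",
--                                      ".csproj", ".props", ".targets"))),
--     ("runtime", lambda l: l.endswith(".cs") or l.endswith(".dll")),
-- ]
--
-- _KEYS = ("runtime", "automation", "docs", "tests", "config", "other")
--
--
-- def _label(lower):
--     return next((name for name, pred in _RULES if pred(lower)), "other")
--
--
-- def classify_changed_files(paths):
--     normalized = [p.replace("\\", "/") for p in paths]
--     return {k: [n for n in normalized if _label(n.lower()) == k] for k in _KEYS}
-- ===== Notes on version B (the rewrite author's own statement) =====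
-- stated objective: idiomatic
-- what changed: Replaces the single-pass if/elif cascade mutating a dict of lists with an ordered rule table (predicate, bucket) consulted by a label function, and builds each bucket by a per-key filter comprehension over the normalized paths.
import Mathlib
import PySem

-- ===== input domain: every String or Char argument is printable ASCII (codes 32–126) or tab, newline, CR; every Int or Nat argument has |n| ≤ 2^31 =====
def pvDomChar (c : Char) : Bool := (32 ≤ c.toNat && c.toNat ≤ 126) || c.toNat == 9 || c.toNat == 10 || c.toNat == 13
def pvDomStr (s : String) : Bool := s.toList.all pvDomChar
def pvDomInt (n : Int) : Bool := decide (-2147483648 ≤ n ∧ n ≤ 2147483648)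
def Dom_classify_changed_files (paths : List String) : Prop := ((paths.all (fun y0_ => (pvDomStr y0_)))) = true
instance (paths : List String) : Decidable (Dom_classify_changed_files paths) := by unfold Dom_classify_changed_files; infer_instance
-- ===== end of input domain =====

-- B replaces A's if/elif cascade mutating a dict of lists by an ordered rule table consulted
-- per path and per-key filter comprehensions (objective: idiomatic); equivalence is exact.

-- ===== PORT A =====
def classify_changed_files (paths : List String) : List (String × List String) :=
  (paths.foldl (fun (groups : PySem.Dict String (List String)) path =>
    let normalized := PySem.Str.replace path "\\" "/"
    let lower := PySem.Str.lower normalized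
    if PySem.Str.isIn "/tests/" lower
        || PySem.Str.endswith lower "_test.py"
        || PySem.Str.endswith lower ".tests.cs"
        || PySem.Str.startswith lower ".github/scripts/tests/" then
      groups.modify "tests" [] (· ++ [normalized])
    else if PySem.Str.startswith lower ".github/workflows/"
        || PySem.Str.startswith lower ".github/scripts/"
        || PySem.Str.startswith lower ".github/issue_template/" then
      groups.modify "automation" [] (· ++ [normalized])
    else if PySem.Str.endswith lower ".md" then
      groups.modify "docs" [] (· ++ [normalized])
    else if PySem.Str.endswith lower ".yml" || PySem.Str.endswith lower ".yaml"
        || PySem.Str.endswith lower ".toml" || PySem.Str.endswith lower ".json"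
        || PySem.Str.endswith lower ".csproj" || PySem.Str.endswith lower ".props"
        || PySem.Str.endswith lower ".targets" then
      groups.modify "config" [] (· ++ [normalized])
    else if PySem.Str.endswith lower ".cs" || PySem.Str.endswith lower ".dll" then
      groups.modify "runtime" [] (· ++ [normalized])
    else
      groups.modify "other" [] (· ++ [normalized]))
    (PySem.Dict.mk [("runtime", []), ("automation", []), ("docs", []),
                    ("tests", []), ("config", []), ("other", [])])).items

-- ===== PORT B =====
def pvRules : List (String × (String → Bool)) :=
  [("tests", fun l => PySem.Str.isIn "/tests/" l
      || PySem.Str.endswith l "_test.py"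
      || PySem.Str.endswith l ".tests.cs"
      || PySem.Str.startswith l ".github/scripts/tests/"),
   ("automation", fun l => PySem.Str.startswith l ".github/workflows/"
      || PySem.Str.startswith l ".github/scripts/"
      || PySem.Str.startswith l ".github/issue_template/"),
   ("docs", fun l => PySem.Str.endswith l ".md"),
   ("config", fun l => PySem.Str.endswith l ".yml" || PySem.Str.endswith l ".yaml"
      || PySem.Str.endswith l ".toml" || PySem.Str.endswith l ".json"
      || PySem.Str.endswith l ".csproj" || PySem.Str.endswith l ".props"
      || PySem.Str.endswith l ".targets"),
   ("runtime", fun l => PySem.Str.endswith l ".cs" || PySem.Str.endswith l ".dll")]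

def pvKeys : List String := ["runtime", "automation", "docs", "tests", "config", "other"]

def pvLabel (lower : String) : String :=
  ((pvRules.find? (fun r => r.2 lower)).map (·.1)).getD "other"

def classify_changed_files_alt (paths : List String) : List (String × List String) :=
  let normalized := paths.map (fun p => PySem.Str.replace p "\\" "/")
  pvKeys.map (fun k => (k, normalized.filter (fun n => pvLabel (PySem.Str.lower n) == k)))

-- ===== PRECONDITION & SPEC =====
def Spec_classify_changed_files (paths : List String) (out : List (String × List String)) : Prop := out = classify_changed_files_alt paths
instance (paths : List String) (out : List (String × List String)) : Decidable (Spec_classify_changed_files paths out) := by unfold Spec_classify_changed_files; infer_instance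

-- ===== CLAIM (what is proved, stated in full; the proofs are below) =====
def Claim_equal_classify_changed_files : Prop := ∀ (paths : List String), Dom_classify_changed_files paths → Spec_classify_changed_files paths (classify_changed_files paths)

-- ===== LEMMAS AND PROOFS =====

-- the bucket B's rule table assigns to a normalized path
def pvBucket (n : String) : String := pvLabel (PySem.Str.lower n)

-- A's branchy loop body is the keyed group-append step
theorem pv_step_eq :
    (fun (groups : PySem.Dict String (List String)) path =>
      let normalized := PySem.Str.replace path "\\" "/"
      let lower := PySem.Str.lower normalized
      if PySem.Str.isIn "/tests/" lower
          || PySem.Str.endswith lower "_test.py"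
          || PySem.Str.endswith lower ".tests.cs"
          || PySem.Str.startswith lower ".github/scripts/tests/" then
        groups.modify "tests" [] (· ++ [normalized])
      else if PySem.Str.startswith lower ".github/workflows/"
          || PySem.Str.startswith lower ".github/scripts/"
          || PySem.Str.startswith lower ".github/issue_template/" then
        groups.modify "automation" [] (· ++ [normalized])
      else if PySem.Str.endswith lower ".md" then
        groups.modify "docs" [] (· ++ [normalized])
      else if PySem.Str.endswith lower ".yml" || PySem.Str.endswith lower ".yaml"
          || PySem.Str.endswith lower ".toml" || PySem.Str.endswith lower ".json"
          || PySem.Str.endswith lower ".csproj" || PySem.Str.endswith lower ".props"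
          || PySem.Str.endswith lower ".targets" then
        groups.modify "config" [] (· ++ [normalized])
      else if PySem.Str.endswith lower ".cs" || PySem.Str.endswith lower ".dll" then
        groups.modify "runtime" [] (· ++ [normalized])
      else
        groups.modify "other" [] (· ++ [normalized]))
    = (fun (groups : PySem.Dict String (List String)) path =>
        groups.modify (pvBucket (PySem.Str.replace path "\\" "/")) []
          (· ++ [PySem.Str.replace path "\\" "/"])) := by
  funext groups path
  simp only [pvBucket, pvLabel, pvRules]
  cases h1 : (PySem.Str.isIn "/tests/" (PySem.Str.lower (PySem.Str.replace path "\\" "/")) || PySem.Str.endswith (PySem.Str.lower (PySem.Str.replace path "\\" "/")) "_test.py" || PySem.Str.endswith (PySem.Str.lower (PySem.Str.replace path "\\" "/")) ".tests.cs" || PySem.Str.startswith (PySem.Str.lower (PySem.Str.replace path "\\" "/")) ".github/scripts/tests/") with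
  | true =>
        simp only [h1, List.find?, Option.map, Option.getD]
        simp
  | false =>
    cases h2 : (PySem.Str.startswith (PySem.Str.lower (PySem.Str.replace path "\\" "/")) ".github/workflows/" || PySem.Str.startswith (PySem.Str.lower (PySem.Str.replace path "\\" "/")) ".github/scripts/" || PySem.Str.startswith (PySem.Str.lower (PySem.Str.replace path "\\" "/")) ".github/issue_template/") with
    | true =>
          simp only [h1, h2, List.find?, Option.map, Option.getD]
          simp
    | false =>
      cases h3 : (PySem.Str.endswith (PySem.Str.lower (PySem.Str.replace path "\\" "/")) ".md") with
      | true =>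
            simp only [h1, h2, h3, List.find?, Option.map, Option.getD]
            simp
      | false =>
        cases h4 : (PySem.Str.endswith (PySem.Str.lower (PySem.Str.replace path "\\" "/")) ".yml" || PySem.Str.endswith (PySem.Str.lower (PySem.Str.replace path "\\" "/")) ".yaml" || PySem.Str.endswith (PySem.Str.lower (PySem.Str.replace path "\\" "/")) ".toml" || PySem.Str.endswith (PySem.Str.lower (PySem.Str.replace path "\\" "/")) ".json" || PySem.Str.endswith (PySem.Str.lower (PySem.Str.replace path "\\" "/")) ".csproj" || PySem.Str.endswith (PySem.Str.lower (PySem.Str.replace path "\\" "/")) ".props" || PySem.Str.endswith (PySem.Str.lower (PySem.Str.replace path "\\" "/")) ".targets") with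
        | true =>
              simp only [h1, h2, h3, h4, List.find?, Option.map, Option.getD]
              simp
        | false =>
          cases h5 : (PySem.Str.endswith (PySem.Str.lower (PySem.Str.replace path "\\" "/")) ".cs" || PySem.Str.endswith (PySem.Str.lower (PySem.Str.replace path "\\" "/")) ".dll") with
          | true =>
                simp only [h1, h2, h3, h4, h5, List.find?, Option.map, Option.getD]
                simp
          | false =>
                simp only [h1, h2, h3, h4, h5, List.find?, Option.map, Option.getD]
                simp

-- every bucket name is one of the six pre-created keys
theorem pv_bucket_mem (n : String) : pvBucket n ∈ pvKeys := by
  simp only [pvBucket, pvLabel, pvRules, List.find?]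
  repeat' split
  all_goals simp [pvKeys]

-- a dict whose keys are exactly the six literals is its getD table
theorem pv_items_of_keys (d : PySem.Dict String (List String)) (h : d.keys = pvKeys) :
    d.items = pvKeys.map (fun k => (k, d.getD k [])) := by
  obtain ⟨l⟩ := d
  simp only [PySem.Dict.keys, pvKeys] at h ⊢
  rcases l with _ | ⟨⟨k1, v1⟩, l⟩ <;> simp_all
  rcases l with _ | ⟨⟨k2, v2⟩, l⟩ <;> simp_all
  rcases l with _ | ⟨⟨k3, v3⟩, l⟩ <;> simp_all
  rcases l with _ | ⟨⟨k4, v4⟩, l⟩ <;> simp_all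
  rcases l with _ | ⟨⟨k5, v5⟩, l⟩ <;> simp_all
  rcases l with _ | ⟨⟨k6, v6⟩, l⟩ <;> simp_all
  obtain ⟨h1, h2, h3, h4, h5, h6, -⟩ := h
  subst h1 h2 h3 h4 h5 h6
  simp [PySem.Dict.getD, PySem.Dict.get?]

-- ===== VERDICT (by name: the statement is the Claim_ definition above) =====
theorem classify_changed_files_spec : Claim_equal_classify_changed_files := by
  intro paths _
  unfold Spec_classify_changed_files classify_changed_files classify_changed_files_alt
  rw [pv_step_eq]
  rw [show (List.foldl (fun (groups : PySem.Dict String (List String)) path =>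
        groups.modify (pvBucket (PySem.Str.replace path "\\" "/")) []
          (· ++ [PySem.Str.replace path "\\" "/"]))
        (PySem.Dict.mk [("runtime", []), ("automation", []), ("docs", []),
                    ("tests", []), ("config", []), ("other", [])]) paths)
      = (List.foldl (fun (groups : PySem.Dict String (List String)) (q : String × String) =>
          groups.modify q.1 [] (· ++ [q.2]))
        (PySem.Dict.mk [("runtime", []), ("automation", []), ("docs", []),
                    ("tests", []), ("config", []), ("other", [])])
        (paths.map (fun p => (pvBucket (PySem.Str.replace p "\\" "/"),
                              PySem.Str.replace p "\\" "/"))))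
      from by rw [List.foldl_map]]
  have hkeys : (List.foldl (fun (groups : PySem.Dict String (List String)) (q : String × String) =>
          groups.modify q.1 [] (· ++ [q.2]))
        (PySem.Dict.mk [("runtime", []), ("automation", []), ("docs", []),
                    ("tests", []), ("config", []), ("other", [])])
        (paths.map (fun p => (pvBucket (PySem.Str.replace p "\\" "/"),
                              PySem.Str.replace p "\\" "/")))).keys = pvKeys := by
    rw [PySem.Dict.keys_foldl_modify_key (β := String × String) _ (fun q => q.1) ([] : List String) (fun _ q v => v ++ [q.2])]
    rw [PySem.Set.update_eq_append_filter]
    have hk0 : (PySem.Dict.mk [("runtime", []), ("automation", []), ("docs", []),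
        ("tests", []), ("config", []), ("other", [])] :
        PySem.Dict String (List String)).keys = pvKeys := rfl
    rw [hk0]
    have : List.filter (fun y => !(PySem.Set.contains pvKeys y))
        (PySem.Set.ofList ((paths.map (fun p => (pvBucket (PySem.Str.replace p "\\" "/"),
            PySem.Str.replace p "\\" "/"))).map (fun q => q.1))) = [] := by
      rw [List.filter_eq_nil_iff]
      intro y hy
      have hy' := (PySem.Set.mem_ofList _ _).mp hy
      simp only [List.map_map, List.mem_map, Function.comp] at hy'
      obtain ⟨p, -, rfl⟩ := hy'
      have hb := pv_bucket_mem (PySem.Str.replace p "\\" "/")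
      simp only [Bool.not_eq_true', Bool.not_eq_false]
      exact (PySem.Set.contains_iff _ _).mpr hb
    rw [this, List.append_nil]
  rw [pv_items_of_keys _ hkeys]
  simp only [PySem.Dict.getD_foldl_modify_append]
  simp [pvKeys, pvBucket, List.filter_map, List.map_map, Function.comp_def,
        PySem.Dict.getD, PySem.Dict.get?]
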